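-- pv_equiv track=rewrite | github.com/dazmagar/labs1_python | assessments/crossover/find_zigzag_triples.py | find_zigzag_triples
-- ===== SOURCE A (Python) =====
-- import typing as t
--
-- def find_zigzag_triples(numbers: t.List[int]) -> t.List[int]:
--     result = []
--     for i in range(len(numbers) - 2):
--         a, b, c = numbers[i], numbers[i + 1], numbers[i + 2]
--         if (a < b > c) or (a > b < c):
--             result.append(1)
--         else:
--             result.append(0)
--     return result
-- ===== SOURCE B (Python) =====
-- import typing as t
--
-- def find_zigzag_triples(numbers: t.List[int]) -> t.List[int]:
--     diffs = [b - a for a, b in zip(numbers, numbers[1:])]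
--     return [1 if x * y < 0 else 0 for x, y in zip(diffs, diffs[1:])]
-- ===== Notes on version B (the rewrite author's own statement) =====
-- stated objective: alternative
-- what changed: B first builds the list of consecutive differences and then tests adjacent difference pairs for a strict sign change (product < 0), instead of re-reading each index triple and comparing three elements.
import Mathlib
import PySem

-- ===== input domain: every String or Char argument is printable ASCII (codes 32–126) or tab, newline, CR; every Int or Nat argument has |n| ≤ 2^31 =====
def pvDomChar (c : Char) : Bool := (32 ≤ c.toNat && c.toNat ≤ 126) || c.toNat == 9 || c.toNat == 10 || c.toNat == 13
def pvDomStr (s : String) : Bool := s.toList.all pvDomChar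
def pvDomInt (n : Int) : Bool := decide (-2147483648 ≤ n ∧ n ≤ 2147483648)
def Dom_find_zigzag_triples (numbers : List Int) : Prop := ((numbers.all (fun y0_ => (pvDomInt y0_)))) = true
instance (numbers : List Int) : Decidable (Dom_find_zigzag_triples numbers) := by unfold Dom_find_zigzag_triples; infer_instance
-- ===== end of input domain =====

-- B re-implements the zigzag test via consecutive differences and a sign-change product; return value only, no side effects.

-- ===== PORT A =====
-- loop indices are always in range, so the default of pyGetD is never used
def find_zigzag_triples (numbers : List Int) : List Int :=
  (PySem.List.pyRange 0 ((numbers.length : Int) - 2) 1).foldl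
    (fun result i =>
      let a := PySem.List.pyGetD numbers i 0
      let b := PySem.List.pyGetD numbers (i + 1) 0
      let c := PySem.List.pyGetD numbers (i + 2) 0
      if (a < b ∧ b > c) ∨ (a > b ∧ b < c) then result ++ [1] else result ++ [0]) []

-- ===== PORT B =====
def find_zigzag_triples_alt (numbers : List Int) : List Int :=
  let diffs := List.zipWith (fun a b => b - a) numbers (numbers.drop 1)
  List.zipWith (fun x y => if x * y < 0 then (1 : Int) else 0) diffs (diffs.drop 1)

-- ===== PRECONDITION & SPEC =====
def Spec_find_zigzag_triples (numbers : List Int) (out : List Int) : Prop := out = find_zigzag_triples_alt numbers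
instance (numbers : List Int) (out : List Int) : Decidable (Spec_find_zigzag_triples numbers out) := by unfold Spec_find_zigzag_triples; infer_instance

-- ===== CLAIM (what is proved, stated in full; the proofs are below) =====
def Claim_equal_find_zigzag_triples : Prop := ∀ (numbers : List Int), Dom_find_zigzag_triples numbers → Spec_find_zigzag_triples numbers (find_zigzag_triples numbers)

-- ===== LEMMAS AND PROOFS =====

-- 'result.append(1 if p else 0)' folded over a list is a map
theorem foldl_if_append {α β : Type} (p : α → Prop) [DecidablePred p] (x y : β) :
    ∀ (l : List α) (acc : List β),
      l.foldl (fun acc i => if p i then acc ++ [x] else acc ++ [y]) acc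
        = acc ++ l.map (fun i => if p i then x else y) := by
  intro l
  induction l with
  | nil => simp
  | cons h t ih =>
      intro acc
      simp only [List.foldl_cons, List.map_cons]
      split_ifs with hp <;> rw [ih] <;> simp

theorem zigzag_iff_prod_neg (a b c : Int) :
    ((a < b ∧ b > c) ∨ (a > b ∧ b < c)) ↔ (b - a) * (c - b) < 0 := by
  rw [mul_neg_iff]; omega

theorem find_zigzag_triples_spec : Claim_equal_find_zigzag_triples := by
  intro numbers _
  unfold Spec_find_zigzag_triples find_zigzag_triples find_zigzag_triples_alt
  rw [foldl_if_append (fun i => ((PySem.List.pyGetD numbers i 0 < PySem.List.pyGetD numbers (i+1) 0 ∧ PySem.List.pyGetD numbers (i+1) 0 > PySem.List.pyGetD numbers (i+2) 0) ∨ (PySem.List.pyGetD numbers i 0 > PySem.List.pyGetD numbers (i+1) 0 ∧ PySem.List.pyGetD numbers (i+1) 0 < PySem.List.pyGetD numbers (i+2) 0))) 1 0]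
  simp only [List.nil_append]
  apply List.ext_getElem
  · simp only [List.length_map, PySem.List.length_pyRange_one, List.length_zipWith,
      List.length_drop]
    omega
  · intro i h1 h2
    have hi : i < numbers.length - 2 := by
      simp only [List.length_map, PySem.List.length_pyRange_one] at h1
      omega
    simp only [List.getElem_map, PySem.List.getElem_pyRange_one, List.getElem_zipWith,
      List.getElem_drop]
    have e0 : (0 : Int) + (i : Int) = ((i : Nat) : Int) := by ring
    have g : ∀ (k : Nat) (hk : k < numbers.length),
        PySem.List.pyGetD numbers (k : Int) 0 = numbers[k]'hk := by
      intro k hk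
      rw [PySem.List.pyGetD_natCast]
      exact List.getD_eq_getElem numbers 0 hk
    rw [e0, show ((i : Nat) : Int) + 1 = (((i + 1 : Nat)) : Int) by push_cast; ring,
        show ((i : Nat) : Int) + 2 = (((i + 2 : Nat)) : Int) by push_cast; ring,
        g i (by omega), g (i+1) (by omega), g (i+2) (by omega)]
    simp only [show 1 + i = i + 1 by omega, show 1 + (i + 1) = i + 2 by omega]
    have := zigzag_iff_prod_neg (numbers[i]'(by omega)) (numbers[i+1]'(by omega)) (numbers[i+2]'(by omega))
    split_ifs with h3 h4 h4 <;> first | rfl | (exfalso; tauto)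

-- ===== VERDICT (by name: the statement is the Claim_ definition above) =====
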